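-- pv_equiv track=rewrite | github.com/rockreel/leetcode | python3/l0296_best_meeting_point.py | minTotalDistance
-- ===== SOURCE A (Python) =====
-- def minTotalDistance(grid):
--     # Write your code here
--     def cal_dist(points):
--         points.sort()
--         i, j = 0, len(points) - 1
--         dist = 0
--         while i < j:
--             dist += points[j] - points[i]
--             i += 1
--             j -= 1
--         return dist
--
--     rows, cols = [], []
--     for i in range(len(grid)):
--         for j in range(len(grid[0])):
--             if grid[i][j]:
--                 rows.append(i)
--                 cols.append(j)
--     return cal_dist(rows) + cal_dist(cols)
-- ===== SOURCE B (Python) =====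
-- def minTotalDistance(grid):
--     # median-based: total Manhattan distance is minimized at the median coordinate,
--     # so sum absolute deviations from the median instead of converging two pointers
--     def cal_dist(points):
--         if not points:
--             return 0
--         points.sort()
--         m = points[len(points) // 2]
--         return sum(abs(p - m) for p in points)
--
--     rows, cols = [], []
--     w = len(grid[0]) if grid else 0
--     for i, row in enumerate(grid):
--         for j in range(w):
--             if row[j]:
--                 rows.append(i)
--                 cols.append(j)
--     return cal_dist(rows) + cal_dist(cols)
-- ===== Notes on version B (the rewrite author's own statement) =====
-- stated objective: simpler
-- what changed: cal_dist's converging two-pointer loop over the sorted list is replaced by picking the median element and summing absolute deviations from it in one expression; the grid scan uses enumerate instead of index ranges.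
import Mathlib
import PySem

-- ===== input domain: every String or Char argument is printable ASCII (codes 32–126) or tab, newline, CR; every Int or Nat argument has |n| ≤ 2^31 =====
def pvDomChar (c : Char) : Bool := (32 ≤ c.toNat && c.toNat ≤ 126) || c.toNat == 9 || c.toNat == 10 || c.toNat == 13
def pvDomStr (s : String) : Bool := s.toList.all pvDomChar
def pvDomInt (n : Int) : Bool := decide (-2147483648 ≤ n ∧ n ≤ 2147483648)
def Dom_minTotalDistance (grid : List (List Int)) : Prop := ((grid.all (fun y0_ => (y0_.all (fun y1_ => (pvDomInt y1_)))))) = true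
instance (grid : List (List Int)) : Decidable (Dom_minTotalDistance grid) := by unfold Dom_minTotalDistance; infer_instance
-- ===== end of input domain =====

-- B replaces A's two-pointer pairing in cal_dist by the median: sort, take the middle
-- element, and sum absolute deviations (simpler; same cost). Return value only; both
-- Pythons sort local lists in place, no caller-visible mutation.

-- ===== PORT A =====
-- while i < j: dist += points[j] - points[i]; i += 1; j -= 1
-- indices are always in range inside the loop (0 ≤ i < j ≤ len-1), so pyGetD is exact
def calDistLoopA (s : List Int) (i j dist : Int) : Int :=
  if i < j then
    calDistLoopA s (i + 1) (j - 1) (dist + PySem.List.pyGetD s j 0 - PySem.List.pyGetD s i 0)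
  else dist
termination_by (j - i).toNat
decreasing_by omega

def calDistA (points : List Int) : Int :=
  let s := PySem.List.sorted points (fun x => x) false
  calDistLoopA s 0 ((s.length : Int) - 1) 0

-- nested for-loops collecting (rows, cols); len(grid[0]) is only reached with grid nonempty
def rowsColsA (grid : List (List Int)) : List Int × List Int :=
  (PySem.List.pyRange 0 (grid.length : Int) 1).foldl (fun rc i =>
    (PySem.List.pyRange 0 ((PySem.List.pyGetD grid 0 []).length : Int) 1).foldl (fun rc j =>
      if PySem.List.pyGetD (PySem.List.pyGetD grid i []) j 0 ≠ 0 then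
        (rc.1 ++ [i], rc.2 ++ [j])
      else rc) rc) ([], [])

def minTotalDistance (grid : List (List Int)) : Int :=
  let rc := rowsColsA grid
  calDistA rc.1 + calDistA rc.2

-- ===== PORT B =====
-- sort, m = points[len(points)//2], sum of abs(p - m); the index is in range since points ≠ []
def calDistB (points : List Int) : Int :=
  if points = [] then 0
  else
    let s := PySem.List.sorted points (fun x => x) false
    let m := s.getD (s.length / 2) 0
    (s.map (fun p => |p - m|)).sum

-- w = len(grid[0]) if grid else 0; for i, row in enumerate(grid): for j in range(w): …
def rowsColsB (grid : List (List Int)) : List Int × List Int :=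
  let w : Int := if grid = [] then 0 else ((PySem.List.pyGetD grid 0 []).length : Int)
  (PySem.List.enumerate grid 0).foldl (fun rc p =>
    (PySem.List.pyRange 0 w 1).foldl (fun rc j =>
      if PySem.List.pyGetD p.2 j 0 ≠ 0 then
        (rc.1 ++ [p.1], rc.2 ++ [j])
      else rc) rc) ([], [])

def minTotalDistance_alt (grid : List (List Int)) : Int :=
  let rc := rowsColsB grid
  calDistB rc.1 + calDistB rc.2

-- ===== PRECONDITION & SPEC =====
-- Pre_ excludes ragged grids whose later rows are shorter than row 0: there Python A
-- (and B alike) raises IndexError on grid[i][j].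
def Pre_minTotalDistance (grid : List (List Int)) : Prop :=
  ∀ row ∈ grid, (grid.headD []).length ≤ row.length
instance (grid : List (List Int)) : Decidable (Pre_minTotalDistance grid) := by
  unfold Pre_minTotalDistance; infer_instance

def pvWitness_minTotalDistance : List (List Int) := [[1, 0, 1], [0, 0, 0], [1, 0, 0]]

def Spec_minTotalDistance (grid : List (List Int)) (out : Int) : Prop := out = minTotalDistance_alt grid
instance (grid : List (List Int)) (out : Int) : Decidable (Spec_minTotalDistance grid out) := by unfold Spec_minTotalDistance; infer_instance

-- ===== CLAIM (what is proved, stated in full; the proofs are below) =====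
def Claim_equal_minTotalDistance : Prop := ∀ (grid : List (List Int)), Dom_minTotalDistance grid → Pre_minTotalDistance grid → Spec_minTotalDistance grid (minTotalDistance grid)

-- ===== LEMMAS AND PROOFS =====

-- pairSum l = (last - first) + pairSum (middle): the quantity A's two-pointer loop computes
def pairSum : List Int → Int
  | [] => 0
  | [_] => 0
  | a :: b :: t => ((b :: t).getLast (List.cons_ne_nil _ _) - a) + pairSum ((b :: t).dropLast)
termination_by l => l.length
decreasing_by simp

theorem pairSum_short (l : List Int) (h : l.length ≤ 1) : pairSum l = 0 := by
  match l, h with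
  | [], _ => simp [pairSum]
  | [x], _ => simp [pairSum]

theorem pairSum_eq (a b : Int) (t : List Int) :
    pairSum (a :: (t ++ [b])) = (b - a) + pairSum t := by
  cases t with
  | nil => simp [pairSum]
  | cons c t' =>
    show pairSum (a :: c :: (t' ++ [b])) = _
    simp only [pairSum]
    rw [List.dropLast_cons_of_ne_nil (by simp), List.dropLast_concat]
    simp

theorem window_decomp (s : List Int) (p q : Nat) (hpq : p < q) (hq : q < s.length) :
    (s.drop p).take (q - p + 1)
      = s[p] :: (((s.drop (p + 1)).take (q - 1 - p)) ++ [s[q]]) := by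
  have hp : p < s.length := lt_trans hpq hq
  rw [List.drop_eq_getElem_cons hp, List.take_succ_cons]
  congr 1
  have h1 : q - p = (q - p - 1) + 1 := by omega
  rw [h1, List.take_add_one]
  have hlen : q - p - 1 < (s.drop (p + 1)).length := by
    rw [List.length_drop]; omega
  have : (s.drop (p + 1))[q - p - 1]? = some s[q] := by
    rw [List.getElem?_drop]
    have : p + 1 + (q - p - 1) = q := by omega
    rw [this, List.getElem?_eq_getElem hq]
  rw [this]
  have : q - p - 1 = q - 1 - p := by omega
  simp [this]

theorem loopA_pairSum (s : List Int) :
    ∀ (n : Nat) (i j d : Int), (j - i).toNat ≤ n → 0 ≤ i → j < s.length →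
    calDistLoopA s i j d = d + pairSum ((s.drop i.toNat).take ((j - i + 1).toNat)) := by
  intro n
  induction n with
  | zero =>
    intro i j d hn hi hj
    rw [calDistLoopA]
    have hij : ¬ i < j := by omega
    rw [if_neg hij]
    have : pairSum ((s.drop i.toNat).take ((j - i + 1).toNat)) = 0 := by
      apply pairSum_short
      have := List.length_take_le ((j - i + 1).toNat) (s.drop i.toNat)
      omega
    omega
  | succ n ih =>
    intro i j d hn hi hj
    rw [calDistLoopA]
    by_cases hij : i < j
    · rw [if_pos hij]
      have hjlen : j.toNat < s.length := by omega
      have hilen : i.toNat < s.length := by omega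
      have hgj : PySem.List.pyGetD s j 0 = s[j.toNat] :=
        PySem.List.pyGetD_eq_getElem s 0 (by omega) (by omega)
      have hgi : PySem.List.pyGetD s i 0 = s[i.toNat] :=
        PySem.List.pyGetD_eq_getElem s 0 hi (by omega)
      rw [ih (i + 1) (j - 1) _ (by omega) (by omega) (by omega)]
      have hw := window_decomp s i.toNat j.toNat (by omega) hjlen
      have e1 : (j - i + 1).toNat = j.toNat - i.toNat + 1 := by omega
      have e2 : (i + 1).toNat = i.toNat + 1 := by omega
      have e3 : (j - 1 - (i + 1) + 1).toNat = j.toNat - 1 - i.toNat := by omega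
      rw [e1, e2, e3, hw, pairSum_eq, hgj, hgi]
      ring
    · rw [if_neg hij]
      have : pairSum ((s.drop i.toNat).take ((j - i + 1).toNat)) = 0 := by
        apply pairSum_short
        have := List.length_take_le ((j - i + 1).toNat) (s.drop i.toNat)
        omega
      omega

-- math core: on a sorted list, the paired differences equal the absolute deviations from the median
theorem pairSum_med :
    ∀ (n : Nat) (w : List Int), w.length ≤ n → w.Pairwise (· ≤ ·) →
    pairSum w = (w.map (fun p => |p - w.getD (w.length / 2) 0|)).sum := by
  intro n
  induction n with
  | zero =>
    intro w hn _
    have : w = [] := List.eq_nil_of_length_eq_zero (by omega)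
    subst this; simp [pairSum]
  | succ n ih =>
    intro w hn hsort
    match w with
    | [] => simp [pairSum]
    | [a] => simp [pairSum_short]
    | a :: c :: r =>
      -- split off the last element: a :: c :: r = a :: (t ++ [b])
      obtain ⟨b, t, hrw⟩ : ∃ b t, c :: r = t ++ [b] := by
        refine ⟨(c :: r).getLast (List.cons_ne_nil _ _), (c :: r).dropLast, ?_⟩
        exact (List.dropLast_concat_getLast (List.cons_ne_nil _ _)).symm
      have hw : a :: c :: r = a :: (t ++ [b]) := congrArg (a :: ·) hrw
      rw [hw] at hsort ⊢
      rw [pairSum_eq]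
      have hsort' := hsort
      rw [List.pairwise_cons] at hsort'
      obtain ⟨ha, hsort2⟩ := hsort'
      rw [List.pairwise_append] at hsort2
      obtain ⟨hst, _, htb⟩ := hsort2
      cases t with
      | nil =>
        have hab : a ≤ b := ha b (by simp)
        simp [pairSum, abs_of_nonneg, abs_of_nonpos, sub_nonpos.mpr hab]
      | cons x t' =>
        set t := x :: t' with ht
        have htne : t ≠ [] := by simp [ht]
        have hlen : (a :: (t ++ [b])).length = t.length + 2 := by simp
        have hhalf : (a :: (t ++ [b])).length / 2 = t.length / 2 + 1 := by
          rw [hlen]; omega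
        have hidx : t.length / 2 < t.length := by
          have : 0 < t.length := List.length_pos_of_ne_nil htne
          omega
        have hm : (a :: (t ++ [b])).getD ((a :: (t ++ [b])).length / 2) 0
            = t.getD (t.length / 2) 0 := by
          rw [hhalf]
          show (t ++ [b]).getD (t.length / 2) 0 = _
          rw [List.getD_eq_getElem?_getD, List.getD_eq_getElem?_getD,
              List.getElem?_append_left hidx]
        set m := t.getD (t.length / 2) 0 with hmdef
        have hmmem : m ∈ t := by
          rw [hmdef, List.getD_eq_getElem?_getD, List.getElem?_eq_getElem hidx]
          exact List.getElem_mem _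
        have ham : a ≤ m := ha m (by simp [List.mem_append.mpr (Or.inl hmmem)])
        have hmb : m ≤ b := htb m hmmem b (by simp)
        rw [hm]
        have hlt : t.length = r.length := by
          have := congrArg List.length hrw; simp at this; omega
        have hih := ih t (by simp at hn ⊢; omega) hst
        rw [List.map_cons, List.sum_cons, List.map_append,
            List.sum_append, List.map_singleton, List.sum_singleton]
        rw [abs_of_nonpos (by omega), abs_of_nonneg (by omega)]
        rw [← hih]
        omega

-- A's cal_dist equals B's cal_dist on every list
theorem calDist_eq (points : List Int) : calDistA points = calDistB points := by
  unfold calDistA calDistB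
  set s := PySem.List.sorted points (fun x => x) false with hs
  have hsort : s.Pairwise (· ≤ ·) := PySem.List.sorted_pairwise points (fun x => x)
  have hloop := loopA_pairSum s (s.length) 0 ((s.length : Int) - 1) 0
    (by omega) (by omega) (by omega)
  simp only [Int.toNat_zero, List.drop_zero, sub_zero] at hloop
  have htake : ((s.length : Int) - 1 + 1).toNat = s.length := by omega
  rw [htake, List.take_length] at hloop
  by_cases hnil : points = []
  · rw [if_pos hnil]
    have : s = [] := by rw [hs, hnil]; rfl
    rw [hloop, this, pairSum_short [] (by simp)]
    omega
  · rw [if_neg hnil]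
    rw [hloop, pairSum_med s.length s (le_refl _) hsort]
    simp

-- the two grid scans build the same (rows, cols)
theorem rowsCols_eq (grid : List (List Int)) : rowsColsA grid = rowsColsB grid := by
  unfold rowsColsA rowsColsB
  by_cases hnil : grid = []
  · subst hnil; rfl
  · rw [if_neg hnil]
    rw [PySem.List.enumerate_eq_map_pyRange grid [], List.foldl_map]
    rfl

-- ===== VERDICT (by name: the statement is the Claim_ definition above) =====
theorem minTotalDistance_spec : Claim_equal_minTotalDistance := by
  intro grid _ _
  unfold Spec_minTotalDistance minTotalDistance minTotalDistance_alt
  simp only [rowsCols_eq, calDist_eq]
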